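-- pv_equiv track=rewrite | github.com/WalterMccan/Image2HTML | image2HTML.py | process
-- ===== SOURCE A (Python) =====
-- from itertools import groupby
--
-- def tup2hex(rgb_tup):
--     t2h = '#%02x%02x%02x' % rgb_tup
--     if t2h[1:].count(t2h[1]) == 6:
--         return t2h[:4]
--     else:
--         return t2h
--
-- def slice_it(hex_pixels, height):
--     rows_list = []
--     start = 0
--     for i in range(height):
--         stop = start + len(hex_pixels[i::height])
--         rows_list.append(hex_pixels[start:stop])
--         start = stop
--     return rows_list
--
-- def process(width, height, pixels):
--     output = f'''<html><head></head><style>td{{height:1;padding:0;}}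
--               table{{border-spacing:0;width:{width}}}</style><center>
--               <table><tr>'''
--
--     # Convert all pixels to hex format
--     hex_pixels = [tup2hex(pixels[x,y]) for y in range(height) for x in range(width)]
--
--     # Group the consecutive pixels with
--     # the same color in the same row into single html statement
--     # e.g. instead of multiple <td width=1 bgcolor=#000 /> make
--     # one with higher width <td width=100 bgcolor=#000 />
--     output_list = []
--     for l in slice_it(hex_pixels, height):
--         tpl = [(k, sum(1 for i in g)) for k,g in groupby(l)]
--         output_list.extend(tpl)
--
--     # Convert to HTML
--     count = 0
--     for d in output_list:
--         output += f'<td width={d[1]} bgcolor={d[0]} />'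
--         count += d[1]
--         if count % width == 0:
--             output += '</tr></table><table><tr>'
--     output += '</tr></table></center></html>'
--     return output
-- ===== SOURCE B (Python) =====
-- from itertools import groupby
--
-- def tup2hex(rgb_tup):
--     t2h = '#%02x%02x%02x' % rgb_tup
--     if t2h[1:].count(t2h[1]) == 6:
--         return t2h[:4]
--     else:
--         return t2h
--
-- def process(width, height, pixels):
--     parts = [f'''<html><head></head><style>td{{height:1;padding:0;}}
--               table{{border-spacing:0;width:{width}}}</style><center>
--               <table><tr>''']
--     for y in range(height):
--         row = [tup2hex(pixels[x, y]) for x in range(width)]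
--         for key, grp in groupby(row):
--             parts.append(f'<td width={sum(1 for _ in grp)} bgcolor={key} />')
--         parts.append('</tr></table><table><tr>')
--     parts.append('</tr></table></center></html>')
--     return ''.join(parts)
-- ===== Notes on version B (the rewrite author's own statement) =====
-- stated objective: simpler
-- what changed: Drops slice_it's stride-slice row splitting, the flattened global run list and the modular count%width row-break counter: B loops per row, run-length-encodes each row directly with groupby, emits its cells and one row break per row, and joins a parts list instead of repeated string concatenation; Pre_ excludes inputs where a needed (x,y) key is missing (A raises KeyError), duplicate-key association lists (they represent no Python dict), and the degenerate width <= 0 < height corner where A emits no row markup but B emits one empty table per row.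
import Mathlib
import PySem

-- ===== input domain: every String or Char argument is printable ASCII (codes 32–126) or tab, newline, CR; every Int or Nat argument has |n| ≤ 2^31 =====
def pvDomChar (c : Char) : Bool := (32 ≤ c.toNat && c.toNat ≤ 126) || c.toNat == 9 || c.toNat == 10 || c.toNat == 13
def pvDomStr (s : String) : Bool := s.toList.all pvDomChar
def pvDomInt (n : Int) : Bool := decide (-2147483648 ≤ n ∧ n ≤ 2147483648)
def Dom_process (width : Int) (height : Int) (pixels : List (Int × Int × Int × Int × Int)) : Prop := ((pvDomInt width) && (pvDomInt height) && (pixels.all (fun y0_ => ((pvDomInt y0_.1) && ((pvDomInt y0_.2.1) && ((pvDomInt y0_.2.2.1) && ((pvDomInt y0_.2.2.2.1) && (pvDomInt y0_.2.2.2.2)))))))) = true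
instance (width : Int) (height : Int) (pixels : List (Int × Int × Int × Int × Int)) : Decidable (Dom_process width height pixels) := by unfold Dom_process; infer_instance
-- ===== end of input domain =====

-- B replaces slice_it + the flattened run list + the count%width row-break counter by one per-row pass
-- (row-wise groupby, one break per row, joined parts list); objective: simpler.

-- ===== shared helpers (both Pythons use the identical tup2hex, pixel lookup, f-string header and groupby run-length step) =====

-- '%02x' % n : lowercase hex, zero-padded to width 2; negative n renders as '-' ++ hex of |n| (exact Python behaviour)
def pct02x (n : Int) : List Char :=
  if n < 0 then '-' :: Nat.toDigits 16 n.natAbs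
  else
    let d := Nat.toDigits 16 n.toNat
    if d.length < 2 then '0' :: d else d

-- tup2hex from the Python module, shared verbatim by A and B
def tup2hex (rgb : Int × Int × Int) : String :=
  let t2h : List Char := '#' :: (pct02x rgb.1 ++ pct02x rgb.2.1 ++ pct02x rgb.2.2)
  let c1 : Char := (PySem.List.pyGet? t2h 1).getD ' '   -- t2h always has ≥ 7 chars, so this is t2h[1]
  if (PySem.List.slice t2h (some 1) none).count c1 = 6 then
    String.ofList (PySem.List.slice t2h none (some 4))
  else
    String.ofList t2h

-- pixels[x, y]: first-match association-list lookup (Pre_ restricts to distinct keys, so exact);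
-- the default is unreachable under Pre_ (missing key = KeyError, excluded by Pre_)
def pixD (pixels : List (Int × Int × Int × Int × Int)) (x y : Int) : String :=
  tup2hex (((pixels.find? (fun p => p.1 == x && p.2.1 == y)).map (fun p => p.2.2)).getD (0, 0, 0))

-- [(k, sum(1 for i in g)) for k, g in groupby(l)] : run-length encoding, shared by both ports
def runs (l : List String) : List (String × Int) :=
  l.foldr (fun x acc =>
    match acc with
    | [] => [(x, 1)]
    | (k, n) :: t => if x = k then (k, n + 1) :: t else (x, 1) :: (k, n) :: t) []

-- the f-string header (identical literal in both Pythons)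
def hdr (width : Int) : String :=
  "<html><head></head><style>td{height:1;padding:0;}\n              table{border-spacing:0;width:"
    ++ PySem.Int.toStr width ++ "}</style><center>\n              <table><tr>"

def tdStr (d : String × Int) : String :=
  "<td width=" ++ PySem.Int.toStr d.2 ++ " bgcolor=" ++ d.1 ++ " />"

-- the body of A's final emit loop (one run: append the td, bump count, break the row on count % width == 0)
def emitStep (width : Int) (st : String × Int) (d : String × Int) : String × Int :=
  let out := st.1 ++ tdStr d
  let count := st.2 + d.2
  if PySem.Int.mod count width = 0 then (out ++ "</tr></table><table><tr>", count)
  else (out, count)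

-- ===== PORT A =====
def slice_it (hex_pixels : List String) (height : Int) : List (List String) :=
  ((PySem.List.pyRange 0 height 1).foldl
    (fun (st : List (List String) × Int) i =>
      let stop := st.2 + (((PySem.List.slice? hex_pixels (some i) none height).getD []).length : Int)
      (st.1 ++ [PySem.List.slice hex_pixels (some st.2) (some stop)], stop))
    ([], 0)).1

def process (width : Int) (height : Int) (pixels : List (Int × Int × Int × Int × Int)) : String :=
  let output := hdr width
  let hex_pixels := (PySem.List.pyRange 0 height 1).flatMap
    (fun y => (PySem.List.pyRange 0 width 1).map (fun x => pixD pixels x y))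
  let output_list := (slice_it hex_pixels height).foldl (fun acc l => acc ++ runs l) []
  let st := output_list.foldl (emitStep width) (output, 0)
  st.1 ++ "</tr></table></center></html>"

-- ===== PORT B =====
-- the body of B's per-row loop: hex the row, emit one td per groupby run, then the row break
def bStep (width : Int) (pixels : List (Int × Int × Int × Int × Int)) (parts : List String) (y : Int) : List String :=
  let row := (PySem.List.pyRange 0 width 1).map (fun x => pixD pixels x y)
  let parts := (runs row).foldl (fun ps d => ps ++ [tdStr d]) parts
  parts ++ ["</tr></table><table><tr>"]

def process_alt (width : Int) (height : Int) (pixels : List (Int × Int × Int × Int × Int)) : String :=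
  let parts : List String := (PySem.List.pyRange 0 height 1).foldl (bStep width pixels) [hdr width]
  String.join (parts ++ ["</tr></table></center></html>"])

-- ===== PRECONDITION & SPEC =====
-- Pre_ excludes inputs where a needed (x,y) key is missing (A raises KeyError; with distinct keys,
-- covering the whole 0≤x<width, 0≤y<height grid is exactly 'width*height in-grid entries'),
-- duplicate-key association lists (they represent no Python dict, whose keys are unique), and the
-- degenerate width ≤ 0 < height corner, where A emits no row markup while B emits one empty table per row.
def Pre_process (width : Int) (height : Int) (pixels : List (Int × Int × Int × Int × Int)) : Prop :=
  pixels.Pairwise (fun p q => p.1 ≠ q.1 ∨ p.2.1 ≠ q.2.1)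
  ∧ (0 < width → 0 < height →
      ((pixels.countP (fun p => decide (0 ≤ p.1 ∧ p.1 < width ∧ 0 ≤ p.2.1 ∧ p.2.1 < height)) : Nat) : Int)
        = width * height)
  ∧ (0 < height → 0 < width)

instance (width : Int) (height : Int) (pixels : List (Int × Int × Int × Int × Int)) : Decidable (Pre_process width height pixels) := by unfold Pre_process; infer_instance

def pvWitness_process : Int × Int × (List (Int × Int × Int × Int × Int)) :=
  (2, 2, [(0, 0, 0, 0, 0), (1, 0, 1, 1, 1), (0, 1, 2, 2, 2), (1, 1, 3, 3, 3)])

def Spec_process (width : Int) (height : Int) (pixels : List (Int × Int × Int × Int × Int)) (out : String) : Prop := out = process_alt width height pixels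
instance (width : Int) (height : Int) (pixels : List (Int × Int × Int × Int × Int)) (out : String) : Decidable (Spec_process width height pixels out) := by unfold Spec_process; infer_instance

-- ===== CLAIM (what is proved, stated in full; the proofs are below) =====
def Claim_equal_process : Prop := ∀ (width : Int) (height : Int) (pixels : List (Int × Int × Int × Int × Int)), Dom_process width height pixels → Pre_process width height pixels → Spec_process width height pixels (process width height pixels)

-- ===== LEMMAS AND PROOFS =====

theorem process_witness_ok :
    Dom_process pvWitness_process.1 pvWitness_process.2.1 pvWitness_process.2.2 ∧
    Pre_process pvWitness_process.1 pvWitness_process.2.1 pvWitness_process.2.2 := by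
  constructor <;> decide

-- ---- generic list lemmas ----

def pvCast (k : ℕ) : Int := k

theorem pv_pyRange01 (h : Int) :
    PySem.List.pyRange 0 h 1 = (List.range h.toNat).map pvCast := by
  by_cases hp : 0 < h
  · simp [PySem.List.pyRange, hp, pvCast]
  · simp [PySem.List.pyRange, hp, Int.toNat_of_nonpos (le_of_not_gt hp)]

theorem pv_len_filterMap {α β : Type} (f : α → Option β) (l : List α)
    (hs : ∀ a ∈ l, (f a).isSome) : (l.filterMap f).length = l.length := by
  induction l with
  | nil => rfl
  | cons a t ih =>
    have ha := hs a (by simp)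
    obtain ⟨b, hb⟩ := Option.isSome_iff_exists.mp ha
    simp [hb, ih (fun x hx => hs x (by simp [hx]))]

theorem pv_join_append (l1 l2 : List String) :
    String.join (l1 ++ l2) = String.join l1 ++ String.join l2 := by
  induction l1 with
  | nil => simp [String.join_eq]
  | cons a t ih => simp [String.join_eq, String.append_assoc] at *

theorem pv_join_cons (s : String) (l : List String) :
    String.join (s :: l) = s ++ String.join l := by
  simp [String.join_eq]

theorem pv_join_singleton (s : String) : String.join [s] = s := by
  rw [pv_join_cons]
  simp [String.join]

-- ---- slice_it characterisation ----

theorem pv_stepslice_len (xs : List String) (H W : ℕ) (hW : 0 < W) (i : ℕ) (hi : i < H)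
    (hlen : xs.length = H * W) :
    ((PySem.List.slice? xs (some (i : Int)) none (H : Int)).getD []).length = W := by
  have hH : 0 < H := by omega
  have hiln : i < xs.length := by
    rw [hlen]; exact lt_of_lt_of_le hi (Nat.le_mul_of_pos_right H hW)
  have hcount : ((xs.length : Int) - (i : Int) + (H : Int) - 1) / (H : Int) = (W : Int) := by
    rw [hlen]
    push_cast
    have he : (H : Int) * W - i + H - 1 = ((H : Int) - 1 - i) + W * H := by ring
    rw [he, Int.add_mul_ediv_right _ _ (by positivity : (H : Int) ≠ 0)]
    rw [Int.ediv_eq_zero_of_lt (by omega) (by omega)]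
    simp
  simp only [PySem.List.slice?, PySem.List.sliceIndices]
  rw [if_neg (show ¬ (H : Int) = 0 by omega)]
  simp only [if_neg (show ¬ (H : Int) < 0 by omega), if_neg (show ¬ (i : Int) < 0 by omega)]
  rw [min_eq_left (by omega : (i : Int) ≤ (xs.length : Int))]
  rw [if_pos (by omega : (0 : Int) < (H : Int)), if_pos (by omega : (i : Int) < (xs.length : Int)),
    hcount, Int.toNat_natCast, Option.getD_some]
  rw [pv_len_filterMap]
  · exact List.length_range
  · intro k hk
    have hkW : k < W := List.mem_range.mp hk
    have hc : ((i : Int) + (H : Int) * (k : Int)) = ((i + H * k : ℕ) : Int) := by push_cast; ring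
    have h2 : H * k ≤ H * (W - 1) := Nat.mul_le_mul_left H (by omega)
    have h3 : H * (W - 1) + H = H * W := by
      rw [← Nat.mul_succ]; congr 1; omega
    rw [hc, Int.toNat_natCast, List.getElem?_eq_getElem (by omega)]
    simp

theorem pv_slice_it_eq (xs : List String) (h : Int) (hh : 0 < h) (W : ℕ) (_hW : 0 < W)
    (hlen : xs.length = h.toNat * W) :
    slice_it xs h = (List.range h.toNat).map (fun j => (xs.drop (j * W)).take W) := by
  unfold slice_it
  rw [pv_pyRange01]
  have hHint : ((h.toNat : Int)) = h := Int.toNat_of_nonneg (le_of_lt hh)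
  rw [← hHint]
  simp only [Int.toNat_natCast]
  set H := h.toNat with hHdef
  have aux : ∀ n, n ≤ H →
      ((List.range n).map pvCast).foldl
        (fun (st : List (List String) × Int) i =>
          let stop := st.2 + (((PySem.List.slice? xs (some i) none (H : Int)).getD []).length : Int)
          (st.1 ++ [PySem.List.slice xs (some st.2) (some stop)], stop))
        ([], 0)
      = ((List.range n).map (fun j => (xs.drop (j * W)).take W), ((n * W : ℕ) : Int)) := by
    intro n
    induction n with
    | zero => intro _; simp
    | succ m ih =>
      intro hm
      rw [List.range_succ, List.map_append, List.foldl_append, ih (by omega),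
        List.map_append]
      simp only [List.map_cons, List.map_nil, List.foldl_cons, List.foldl_nil, pvCast]
      rw [pv_stepslice_len xs H W _hW m (by omega) hlen]
      have hc : ((m * W : ℕ) : Int) + ((W : ℕ) : Int) = ((m * W + W : ℕ) : Int) := by push_cast; ring
      rw [hc, PySem.List.slice_natCast]
      have ht : m * W + W - m * W = W := by omega
      rw [ht]
      have hs : (m + 1) * W = m * W + W := by ring
      rw [hs]
  rw [aux H le_rfl]

theorem pv_chunks_flat (W : ℕ) (_hW : 0 < W) :
    ∀ (rows : List (List String)), (∀ r ∈ rows, r.length = W) →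
    (List.range rows.length).map (fun j => ((rows.flatMap id).drop (j * W)).take W) = rows := by
  intro rows
  induction rows with
  | nil => intro _; simp
  | cons r rs ih =>
    intro hlen
    have hr : r.length = W := hlen r (by simp)
    have ih' := ih (fun s hs => hlen s (by simp [hs]))
    rw [List.length_cons, List.range_succ_eq_map, List.map_cons, List.map_map]
    congr 1
    · simp only [Nat.zero_mul, List.drop_zero, List.flatMap_cons, id]
      rw [← hr, List.take_left]
    · refine Eq.trans (List.map_congr_left ?_) ih'
      intro j hj
      simp only [Function.comp_apply, List.flatMap_cons, id]
      have hjw : (j + 1) * W = r.length + j * W := by rw [hr]; ring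
      rw [hjw, List.drop_length_add_append]

-- ---- runs facts ----

theorem runs_cons (x : String) (xs : List String) :
    runs (x :: xs) = match runs xs with
      | [] => [(x, 1)]
      | (k, n) :: t => if x = k then (k, n + 1) :: t else (x, 1) :: (k, n) :: t := rfl

theorem pv_runs_ne_nil (l : List String) (hl : l ≠ []) : runs l ≠ [] := by
  cases l with
  | nil => exact absurd rfl hl
  | cons x xs =>
    rw [runs_cons]
    rcases runs xs with _ | ⟨⟨k, n⟩, t⟩
    · simp
    · by_cases hx : x = k <;> simp [hx]

theorem pv_runs_pos (l : List String) : ∀ d ∈ runs l, 0 < d.2 := by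
  induction l with
  | nil => simp [runs]
  | cons x xs ih =>
    rw [runs_cons]
    rcases hr : runs xs with _ | ⟨⟨k, n⟩, t⟩
    · simp
    · have hn : 0 < n := by have := ih (k, n); simp [hr] at this; exact this
      have ht : ∀ d ∈ t, 0 < d.2 := fun d hd => ih d (by simp [hr, hd])
      by_cases hx : x = k
      · simp only [hx, if_true]
        intro d hd
        rcases List.mem_cons.mp hd with h1 | h2
        · subst h1; simpa using by omega
        · exact ht d h2
      · simp only [if_neg hx]
        intro d hd
        rcases List.mem_cons.mp hd with h1 | h2
        · subst h1; norm_num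
        · rcases List.mem_cons.mp h2 with h3 | h4
          · subst h3; simpa using hn
          · exact ht d h4

theorem pv_runs_sum (l : List String) : ((runs l).map (·.2)).sum = (l.length : Int) := by
  induction l with
  | nil => simp [runs]
  | cons x xs ih =>
    rw [runs_cons]
    rcases hr : runs xs with _ | ⟨⟨k, n⟩, t⟩
    · rw [hr] at ih; simp at ih ⊢; exact List.length_eq_zero_iff.mp (by exact_mod_cast ih.symm)
    · rw [hr] at ih
      by_cases hx : x = k
      · simp only [hx, if_true]
        simp at ih ⊢
        omega
      · simp only [if_neg hx]
        simp at ih ⊢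
        omega

-- ---- the emit loop ----

theorem pv_mod_mul_add (w k x : Int) (hw : 0 < w) (hx : 0 ≤ x) (hxw : x ≤ w) :
    PySem.Int.mod (k * w + x) w = if x = w then 0 else x := by
  rw [PySem.Int.mod_eq_emod_of_pos hw]
  by_cases h : x = w
  · simp [h]
  · rw [if_neg h, Int.add_comm, Int.add_mul_emod_self_right]
    exact Int.emod_eq_of_lt hx (by omega)

theorem pv_sum_pos (ds : List (String × Int)) (hne : ds ≠ []) (hpos : ∀ d ∈ ds, 0 < d.2) :
    0 < ((ds.map (·.2)).sum) := by
  rcases ds with _ | ⟨d, t⟩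
  · exact absurd rfl hne
  · have h1 := hpos d (by simp)
    have h2 : 0 ≤ ((t.map (·.2)).sum) :=
      List.sum_nonneg (by intro x hx; obtain ⟨e, he, rfl⟩ := List.mem_map.mp hx; exact le_of_lt (hpos e (by simp [he])))
    simp only [List.map_cons, List.sum_cons]
    omega

theorem pv_emit_runs (w : Int) (hw : 0 < w) :
    ∀ (ds : List (String × Int)), ds ≠ [] → (∀ d ∈ ds, 0 < d.2) →
    ∀ (out : String) (k t : Int), 0 ≤ t → t + ((ds.map (·.2)).sum) = w →
    ds.foldl (emitStep w) (out, k * w + t)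
      = (out ++ String.join (ds.map tdStr) ++ "</tr></table><table><tr>", k * w + w) := by
  intro ds
  induction ds with
  | nil => intro h; exact absurd rfl h
  | cons d ds' ih =>
    intro _ hpos out k t ht hsum
    have hd := hpos d (by simp)
    simp only [List.map_cons, List.sum_cons] at hsum
    by_cases hds' : ds' = []
    · subst hds'
      simp only [List.map_nil, List.sum_nil] at hsum
      have hx : t + d.2 = w := by omega
      simp only [List.foldl_cons, List.foldl_nil, emitStep]
      rw [Int.add_assoc, hx, pv_mod_mul_add w k w hw (by omega) (by omega)]
      simp [String.join_eq, String.append_assoc]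
    · have hpos' : ∀ e ∈ ds', 0 < e.2 := fun e he => hpos e (by simp [he])
      have hs' := pv_sum_pos ds' hds' hpos'
      have hlt : t + d.2 < w := by omega
      simp only [List.foldl_cons, emitStep]
      rw [Int.add_assoc, pv_mod_mul_add w k (t + d.2) hw (by omega) (by omega),
        if_neg (show ¬(t + d.2) = w by omega), if_neg (show ¬(t + d.2) = 0 by omega),
        ih hds' hpos' (out ++ tdStr d) k (t + d.2) (by omega) (by omega)]
      simp [pv_join_cons, String.append_assoc]


theorem pv_emit_row (w : Int) (hw : 0 < w) (row : List String) (hrow : (row.length : Int) = w)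
    (out : String) (k : Int) :
    (runs row).foldl (emitStep w) (out, k * w)
      = (out ++ String.join ((runs row).map tdStr ++ ["</tr></table><table><tr>"]), (k + 1) * w) := by
  have hne : row ≠ [] := by intro h; subst h; simp at hrow; omega
  have h2 : k * w = k * w + 0 := by ring
  rw [h2, pv_emit_runs w hw (runs row) (pv_runs_ne_nil row hne) (pv_runs_pos row) out k 0 le_rfl
      (by rw [pv_runs_sum row, hrow]; ring)]
  rw [pv_join_append, Prod.mk.injEq]
  constructor
  · simp [String.join_eq, String.append_assoc]
  · ring

theorem pv_emit_rows (w : Int) (hw : 0 < w) (rowOf : Int → List String)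
    (hr : ∀ y, ((rowOf y).length : Int) = w) :
    ∀ (ys : List Int) (out : String) (k : Int),
    (ys.flatMap (fun y => runs (rowOf y))).foldl (emitStep w) (out, k * w)
      = (out ++ String.join (ys.flatMap (fun y => (runs (rowOf y)).map tdStr ++ ["</tr></table><table><tr>"])),
         (k + ys.length) * w) := by
  intro ys
  induction ys with
  | nil => intro out k; simp [String.join_eq]
  | cons y ys ih =>
    intro out k
    rw [List.flatMap_cons, List.foldl_append,
      pv_emit_row w hw (rowOf y) (hr y) out k,
      ih _ (k + 1), List.flatMap_cons, Prod.mk.injEq]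
    constructor
    · rw [String.append_assoc, ← pv_join_append]
    · simp only [List.length_cons]; push_cast; ring

-- ---- B characterisation ----

theorem pv_bfold (w : Int) (pixels : List (Int × Int × Int × Int × Int)) :
    ∀ (ys : List Int) (parts : List String),
    ys.foldl (bStep w pixels) parts
      = parts ++ ys.flatMap (fun y =>
          ((runs ((PySem.List.pyRange 0 w 1).map (fun x => pixD pixels x y))).map tdStr)
            ++ ["</tr></table><table><tr>"]) := by
  intro ys
  induction ys with
  | nil => intro parts; simp
  | cons y ys ih =>
    intro parts
    rw [List.foldl_cons, List.flatMap_cons]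
    show List.foldl (bStep w pixels) (bStep w pixels parts y) ys = _
    rw [ih (bStep w pixels parts y)]
    simp only [bStep, PySem.List.foldl_append_eq_flatMap]
    rw [← List.map_eq_flatMap]
    simp [List.append_assoc]

-- ===== VERDICT (by name: the statement is the Claim_ definition above) =====
theorem pv_len_flat {α : Type} (f : Int → List α) (W : ℕ) (ys : List Int)
    (hf : ∀ y, (f y).length = W) : (ys.flatMap f).length = ys.length * W := by
  induction ys with
  | nil => simp
  | cons y t ih => simp [List.flatMap_cons, hf, ih]; ring

theorem process_spec : Claim_equal_process := by
  intro w h pixels _ hpre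
  obtain ⟨_, _, hwh⟩ := hpre
  show process w h pixels = process_alt w h pixels
  by_cases hh : 0 < h
  · -- positive height: w > 0 as well
    have hw : 0 < w := hwh hh
    have hWpos : 0 < w.toNat := by omega
    have hrl : ∀ y : Int,
        (((PySem.List.pyRange 0 w 1).map (fun x => pixD pixels x y)).length : Int) = w := by
      intro y
      simp [pv_pyRange01]
      omega
    have hlenflat :
        (((List.range h.toNat).map pvCast).flatMap
          (fun y => (PySem.List.pyRange 0 w 1).map (fun x => pixD pixels x y))).length
          = h.toNat * w.toNat := by
      rw [pv_len_flat _ w.toNat _ (fun y => by have := hrl y; omega)]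
      simp
    -- A side
    simp only [process, process_alt]
    rw [pv_pyRange01 h]
    rw [pv_slice_it_eq _ h hh w.toNat hWpos (by rw [hlenflat])]
    have hflatid :
        ((List.range h.toNat).map pvCast).flatMap
            (fun y => (PySem.List.pyRange 0 w 1).map (fun x => pixD pixels x y))
          = (((List.range h.toNat).map pvCast).map
              (fun y => (PySem.List.pyRange 0 w 1).map (fun x => pixD pixels x y))).flatMap id := by
      simp [List.flatMap_map]
    have hchunks := pv_chunks_flat w.toNat hWpos
      (((List.range h.toNat).map pvCast).map
        (fun y => (PySem.List.pyRange 0 w 1).map (fun x => pixD pixels x y)))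
      (by intro r hr; obtain ⟨y, _, rfl⟩ := List.mem_map.mp hr; have := hrl y; omega)
    rw [hflatid]
    have hlenrows :
        (((List.range h.toNat).map pvCast).map
          (fun y => (PySem.List.pyRange 0 w 1).map (fun x => pixD pixels x y))).length
          = h.toNat := by simp
    rw [hlenrows] at hchunks
    rw [hchunks]
    rw [PySem.List.foldl_append_eq_flatMap, List.nil_append, List.flatMap_map]
    have hemit := pv_emit_rows w hw _ hrl ((List.range h.toNat).map pvCast) (hdr w) 0
    rw [zero_mul] at hemit
    rw [hemit]
    -- B side
    rw [pv_bfold w pixels ((List.range h.toNat).map pvCast) [hdr w]]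
    rw [List.append_assoc, List.singleton_append, pv_join_cons, pv_join_append, pv_join_singleton]
    simp [String.append_assoc]

  · -- h ≤ 0 : no rows on either side
    have ht0 : h.toNat = 0 := by omega
    simp only [process, process_alt, slice_it]
    rw [pv_pyRange01 h, ht0]
    simp [String.join]
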